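-- pv_equiv track=rewrite | github.com/NeeleKemper/moevorl-ev-cm | test_scripts/test_utils.py | get_metric_name
-- ===== SOURCE A (Python) =====
-- def get_metric_name(metric: str):
--     replacements = {
--         'Obj': 'Overall',
--         'Hv': 'HV',
--         'Soc': 'SoC',
--         'Pv': 'PV',
--         'Eum': 'EUM'
--     }
--     title_metric = metric.replace('_', ' ').title()
--     for old, new in replacements.items():
--         title_metric = title_metric.replace(old, new)
--     return title_metric
-- ===== SOURCE B (Python) =====
-- def get_metric_name(metric: str):
--     replacements = {
--         'Obj': 'Overall',
--         'Hv': 'HV',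
--         'Soc': 'SoC',
--         'Pv': 'PV',
--         'Eum': 'EUM'
--     }
--     # one pass: map '_' to ' ' and title-case at the same time
--     chars = []
--     prev_alpha = False
--     for ch in metric:
--         if ch == '_':
--             ch = ' '
--         if ch.isalpha():
--             chars.append(ch.lower() if prev_alpha else ch.upper())
--             prev_alpha = True
--         else:
--             chars.append(ch)
--             prev_alpha = False
--     t = ''.join(chars)
--     # one simultaneous left-to-right pass applying the whole replacement table
--     out = []
--     i = 0
--     n = len(t)
--     while i < n:
--         for old, new in replacements.items():
--             if t.startswith(old, i):
--                 out.append(new)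
--                 i += len(old)
--                 break
--         else:
--             out.append(t[i])
--             i += 1
--     return ''.join(out)
-- ===== Notes on version B (the rewrite author's own statement) =====
-- stated objective: alternative
-- what changed: The underscore substitution and title-casing are fused into one character pass, and the five sequential full-string .replace passes are replaced by a single simultaneous left-to-right scan driven by the replacement table (the keys never overlap and no replacement output re-creates a key).
import Mathlib
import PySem

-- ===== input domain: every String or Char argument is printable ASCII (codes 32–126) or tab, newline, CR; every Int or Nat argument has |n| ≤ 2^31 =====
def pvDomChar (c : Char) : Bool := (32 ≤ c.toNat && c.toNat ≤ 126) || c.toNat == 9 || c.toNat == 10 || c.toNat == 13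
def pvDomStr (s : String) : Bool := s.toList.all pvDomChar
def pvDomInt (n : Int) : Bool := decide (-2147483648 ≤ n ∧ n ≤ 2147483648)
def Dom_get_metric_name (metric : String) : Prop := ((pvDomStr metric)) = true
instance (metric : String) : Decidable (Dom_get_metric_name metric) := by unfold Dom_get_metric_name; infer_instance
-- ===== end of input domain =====

-- B replaces the five sequential full-string .replace passes by one simultaneous left-to-right
-- table scan, fused with a single pass doing '_'->' ' and title-casing together (objective: alternative).

-- ===== PORT A =====
-- hand-port of str.title(): exact on the ASCII domain, where the cased characters are exactly the letters
def pyTitle : List Char → Bool → List Char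
  | [], _ => []
  | c :: t, prev =>
      (if PySem.Chars.isalpha c then
        (if prev then PySem.Chars.lowerChar c else PySem.Chars.upperChar c) else c)
        :: pyTitle t (PySem.Chars.isalpha c)

def get_metric_name (metric : String) : String :=
  let replacements : PySem.Dict String String :=
    PySem.Dict.ofList [("Obj", "Overall"), ("Hv", "HV"), ("Soc", "SoC"), ("Pv", "PV"), ("Eum", "EUM")]
  let title_metric : String := String.ofList (pyTitle (PySem.Str.replace metric "_" " ").toList false)
  replacements.items.foldl (fun s p => PySem.Str.replace s p.1 p.2) title_metric

-- ===== PORT B =====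
-- single pass: '_' -> ' ' and title-casing together (prev = previous char was a letter)
def altTitle : List Char → Bool → List Char
  | [], _ => []
  | c0 :: t, prev =>
      let c := if c0 = '_' then ' ' else c0
      if PySem.Chars.isalpha c then
        (if prev then PySem.Chars.lowerChar c else PySem.Chars.upperChar c) :: altTitle t true
      else c :: altTitle t false

-- single simultaneous left-to-right scan applying the whole replacement table
def altReplace : List Char → List Char
  | [] => []
  | 'O' :: 'b' :: 'j' :: r => 'O' :: 'v' :: 'e' :: 'r' :: 'a' :: 'l' :: 'l' :: altReplace r
  | 'H' :: 'v' :: r => 'H' :: 'V' :: altReplace r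
  | 'S' :: 'o' :: 'c' :: r => 'S' :: 'o' :: 'C' :: altReplace r
  | 'P' :: 'v' :: r => 'P' :: 'V' :: altReplace r
  | 'E' :: 'u' :: 'm' :: r => 'E' :: 'U' :: 'M' :: altReplace r
  | c :: r => c :: altReplace r

def get_metric_name_alt (metric : String) : String :=
  String.ofList (altReplace (altTitle metric.toList false))

-- ===== PRECONDITION & SPEC =====
def Spec_get_metric_name (metric : String) (out : String) : Prop := out = get_metric_name_alt metric
instance (metric : String) (out : String) : Decidable (Spec_get_metric_name metric out) := by unfold Spec_get_metric_name; infer_instance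

-- ===== CLAIM (what is proved, stated in full; the proofs are below) =====
def Claim_equal_get_metric_name : Prop := ∀ (metric : String), Dom_get_metric_name metric → Spec_get_metric_name metric (get_metric_name metric)

-- ===== LEMMAS AND PROOFS =====

-- proof-side model of CPython's str.replace scan (what PySem.Chars.replace.go computes)
def scan (old new : List Char) : List Char → List Char
  | [] => []
  | c :: t =>
      if h : old ≠ [] ∧ old.isPrefixOf (c :: t) then
        new ++ scan old new ((c :: t).drop old.length)
      else c :: scan old new t
termination_by l => l.length
decreasing_by
  · have h1 : 0 < old.length := List.length_pos_iff.mpr h.1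
    simp [List.length_drop]; omega
  · simp

theorem go_eq_scan (old new : List Char) (hold : old ≠ []) :
    ∀ (fuel : Nat) (l acc : List Char), l.length ≤ fuel →
      PySem.Chars.replace.go old new fuel l acc = acc.reverse ++ scan old new l := by
  intro fuel
  induction fuel with
  | zero =>
      intro l acc hl
      have hnil : l = [] := List.eq_nil_of_length_eq_zero (Nat.le_zero.mp hl)
      subst hnil
      rw [PySem.Chars.replace.go, scan]
  | succ n ih =>
      intro l acc hl
      cases l with
      | nil =>
          rw [PySem.Chars.replace.go, scan]
          · simp
          · omega
      | cons c t =>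
          rw [PySem.Chars.replace.go]
          by_cases hp : old.isPrefixOf (c :: t)
          · rw [if_pos hp]
            have hlen : ((c :: t).drop old.length).length ≤ n := by
              have h1 : 0 < old.length := List.length_pos_iff.mpr hold
              simp only [List.length_drop, List.length_cons] at *
              omega
            rw [ih _ _ hlen, scan, dif_pos ⟨hold, hp⟩]
            simp
          · rw [if_neg hp]
            have hlen : t.length ≤ n := by simp at hl; omega
            rw [ih _ _ hlen, scan, dif_neg (by tauto)]
            simp

theorem replace_eq_scan (s old new : List Char) (hold : old ≠ []) :
    PySem.Chars.replace s old new = scan old new s := by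
  rw [PySem.Chars.replace]
  rw [if_neg (by simpa [List.isEmpty_iff] using hold)]
  simpa using go_eq_scan old new hold s.length s [] le_rfl

-- the '_' -> ' ' replacement is a character map
theorem scan_underscore (l : List Char) :
    scan ['_'] [' '] l = l.map (fun c => if c = '_' then ' ' else c) := by
  induction l with
  | nil => rw [scan]; simp
  | cons c t ih =>
      rw [scan]
      by_cases hc : c = '_'
      · subst hc
        rw [dif_pos (by simp [List.isPrefixOf])]
        simp [ih]
      · rw [dif_neg (by simp [List.isPrefixOf]; exact fun h => hc h.symm)]
        simp [hc, ih]

-- fusing title() with the underscore map gives altTitle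
theorem title_map (l : List Char) : ∀ prev : Bool,
    pyTitle (l.map (fun c => if c = '_' then ' ' else c)) prev = altTitle l prev := by
  induction l with
  | nil => intro prev; rfl
  | cons c t ih =>
      intro prev
      by_cases hc : c = '_'
      · subst hc
        simp only [List.map, pyTitle, altTitle]
        have hsp : PySem.Chars.isalpha ' ' = false := by decide
        simp [hsp, ih]
      · simp only [List.map, if_neg hc, pyTitle, altTitle]
        by_cases ha : PySem.Chars.isalpha c = true <;> simp [ha, ih]

-- short names for the five sequential scans
def sO (m : List Char) : List Char := scan ['O','b','j'] ['O','v','e','r','a','l','l'] m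
def sH (m : List Char) : List Char := scan ['H','v'] ['H','V'] m
def sS (m : List Char) : List Char := scan ['S','o','c'] ['S','o','C'] m
def sP (m : List Char) : List Char := scan ['P','v'] ['P','V'] m
def sE (m : List Char) : List Char := scan ['E','u','m'] ['E','U','M'] m

theorem scan_cons_not (old new : List Char) (c : Char) (t : List Char)
    (h : ¬ old.isPrefixOf (c :: t)) : scan old new (c :: t) = c :: scan old new t := by
  rw [scan, dif_neg (by tauto)]

theorem scan_cons_hd (old new : List Char) (c : Char) (t : List Char)
    (h : old.head? ≠ some c) : scan old new (c :: t) = c :: scan old new t := by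
  cases old with
  | nil => rw [scan, dif_neg (by simp)]
  | cons a old' =>
      have hac : a ≠ c := fun he => h (by simp [he])
      exact scan_cons_not _ _ _ _ (by simp [List.isPrefixOf, hac])

-- one-character steps when the key cannot start here
theorem stepO {c : Char} {t : List Char} (h : c ≠ 'O') : sO (c :: t) = c :: sO t :=
  scan_cons_hd _ _ _ _ (by simpa using (Ne.symm h))
theorem stepH {c : Char} {t : List Char} (h : c ≠ 'H') : sH (c :: t) = c :: sH t :=
  scan_cons_hd _ _ _ _ (by simpa using (Ne.symm h))
theorem stepS {c : Char} {t : List Char} (h : c ≠ 'S') : sS (c :: t) = c :: sS t :=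
  scan_cons_hd _ _ _ _ (by simpa using (Ne.symm h))
theorem stepP {c : Char} {t : List Char} (h : c ≠ 'P') : sP (c :: t) = c :: sP t :=
  scan_cons_hd _ _ _ _ (by simpa using (Ne.symm h))
theorem stepE {c : Char} {t : List Char} (h : c ≠ 'E') : sE (c :: t) = c :: sE t :=
  scan_cons_hd _ _ _ _ (by simpa using (Ne.symm h))

-- the key does match here
theorem matchO (t : List Char) : sO ('O'::'b'::'j'::t) = 'O'::'v'::'e'::'r'::'a'::'l'::'l':: sO t := by
  unfold sO; rw [scan, dif_pos ⟨by decide, by simp [List.isPrefixOf]⟩]; rfl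
theorem matchH (t : List Char) : sH ('H'::'v'::t) = 'H'::'V':: sH t := by
  unfold sH; rw [scan, dif_pos ⟨by decide, by simp [List.isPrefixOf]⟩]; rfl
theorem matchS (t : List Char) : sS ('S'::'o'::'c'::t) = 'S'::'o'::'C':: sS t := by
  unfold sS; rw [scan, dif_pos ⟨by decide, by simp [List.isPrefixOf]⟩]; rfl
theorem matchP (t : List Char) : sP ('P'::'v'::t) = 'P'::'V':: sP t := by
  unfold sP; rw [scan, dif_pos ⟨by decide, by simp [List.isPrefixOf]⟩]; rfl
theorem matchE (t : List Char) : sE ('E'::'u'::'m'::t) = 'E'::'U'::'M':: sE t := by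
  unfold sE; rw [scan, dif_pos ⟨by decide, by simp [List.isPrefixOf]⟩]; rfl

-- key and replacement share their first character, so a scan preserves the head
theorem scan_head (old new : List Char) (hold : old ≠ []) (hnew : new ≠ [])
    (hh : new.head? = old.head?) (l : List Char) : (scan old new l).head? = l.head? := by
  cases l with
  | nil => rw [scan]
  | cons c t =>
      rw [scan]
      by_cases h : old ≠ [] ∧ old.isPrefixOf (c :: t)
      · rw [dif_pos h]
        obtain ⟨a, old', rfl⟩ := List.exists_cons_of_ne_nil hold
        obtain ⟨b, new', rfl⟩ := List.exists_cons_of_ne_nil hnew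
        have hp := h.2
        simp [List.isPrefixOf] at hp
        simp at hh
        simp [hh, hp.1]
      · rw [dif_neg h]; simp

theorem headO (m : List Char) : (sO m).head? = m.head? :=
  scan_head _ _ (by decide) (by decide) (by decide) m
theorem headH (m : List Char) : (sH m).head? = m.head? :=
  scan_head _ _ (by decide) (by decide) (by decide) m
theorem headS (m : List Char) : (sS m).head? = m.head? :=
  scan_head _ _ (by decide) (by decide) (by decide) m
theorem headP (m : List Char) : (sP m).head? = m.head? :=
  scan_head _ _ (by decide) (by decide) (by decide) m

-- decoding isPrefixOf for 2- and 3-character keys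
theorem prefix2_iff (a b c : Char) (t : List Char) :
    [a,b].isPrefixOf (c :: t) = true ↔ c = a ∧ ∃ t', t = b :: t' := by
  cases t with
  | nil => simp [List.isPrefixOf]
  | cons e t' =>
      simp [List.isPrefixOf]
      constructor
      · rintro ⟨h1, h2⟩; exact ⟨h1.symm, h2.symm⟩
      · rintro ⟨h1, h2⟩; exact ⟨h1.symm, h2.symm⟩

theorem prefix3_iff (a b d c : Char) (t : List Char) :
    [a,b,d].isPrefixOf (c :: t) = true ↔ c = a ∧ ∃ t', t = b :: d :: t' := by
  cases t with
  | nil => simp [List.isPrefixOf]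
  | cons e t' =>
      cases t' with
      | nil => simp [List.isPrefixOf]
      | cons e2 t2 =>
          simp [List.isPrefixOf]
          constructor
          · rintro ⟨h1, h2, h3⟩; exact ⟨h1.symm, h2.symm, h3.symm⟩
          · rintro ⟨h1, h2, h3⟩; exact ⟨h1.symm, h2.symm, h3.symm⟩

-- unfolding altReplace in the default case
theorem altReplace_default (c : Char) (r : List Char)
    (h1 : ∀ (r₁ : List Char), c = 'O' → r = 'b' :: 'j' :: r₁ → False)
    (h2 : ∀ (r₁ : List Char), c = 'H' → r = 'v' :: r₁ → False)
    (h3 : ∀ (r₁ : List Char), c = 'S' → r = 'o' :: 'c' :: r₁ → False)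
    (h4 : ∀ (r₁ : List Char), c = 'P' → r = 'v' :: r₁ → False)
    (h5 : ∀ (r₁ : List Char), c = 'E' → r = 'u' :: 'm' :: r₁ → False) :
    altReplace (c :: r) = c :: altReplace r := by
  rw [altReplace.eq_def]
  split
  · simp_all
  · rename_i heq; injection heq with heqc heqr; exact (h1 _ heqc heqr).elim
  · rename_i heq; injection heq with heqc heqr; exact (h2 _ heqc heqr).elim
  · rename_i heq; injection heq with heqc heqr; exact (h3 _ heqc heqr).elim
  · rename_i heq; injection heq with heqc heqr; exact (h4 _ heqc heqr).elim
  · rename_i heq; injection heq with heqc heqr; exact (h5 _ heqc heqr).elim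
  · rename_i heq; injection heq with heqc heqr; rw [heqc, heqr]

-- the five sequential scans collapse into the one simultaneous scan
theorem chain_eq_altReplace (l : List Char) :
    sE (sP (sS (sH (sO l)))) = altReplace l := by
  induction l using altReplace.induct with
  | case1 =>
      show sE (sP (sS (sH (sO [])))) = altReplace []
      unfold sO sH sS sP sE
      rw [scan, scan, scan, scan, scan]
      rfl
  | case2 r ih =>
      rw [matchO,
          stepH (by decide), stepH (by decide), stepH (by decide), stepH (by decide),
          stepH (by decide), stepH (by decide), stepH (by decide),
          stepS (by decide), stepS (by decide), stepS (by decide), stepS (by decide),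
          stepS (by decide), stepS (by decide), stepS (by decide),
          stepP (by decide), stepP (by decide), stepP (by decide), stepP (by decide),
          stepP (by decide), stepP (by decide), stepP (by decide),
          stepE (by decide), stepE (by decide), stepE (by decide), stepE (by decide),
          stepE (by decide), stepE (by decide), stepE (by decide), ih]
      rfl
  | case3 r ih =>
      rw [stepO (by decide), stepO (by decide), matchH,
          stepS (by decide), stepS (by decide),
          stepP (by decide), stepP (by decide),
          stepE (by decide), stepE (by decide), ih]
      rfl
  | case4 r ih =>
      rw [stepO (by decide), stepO (by decide), stepO (by decide),
          stepH (by decide), stepH (by decide), stepH (by decide), matchS,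
          stepP (by decide), stepP (by decide), stepP (by decide),
          stepE (by decide), stepE (by decide), stepE (by decide), ih]
      rfl
  | case5 r ih =>
      rw [stepO (by decide), stepO (by decide),
          stepH (by decide), stepH (by decide),
          stepS (by decide), stepS (by decide), matchP,
          stepE (by decide), stepE (by decide), ih]
      rfl
  | case6 r ih =>
      rw [stepO (by decide), stepO (by decide), stepO (by decide),
          stepH (by decide), stepH (by decide), stepH (by decide),
          stepS (by decide), stepS (by decide), stepS (by decide),
          stepP (by decide), stepP (by decide), stepP (by decide), matchE, ih]
      rfl
  | case7 c r h1 h2 h3 h4 h5 ih =>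
      -- sO steps over c
      have hO1 : ¬ ['O','b','j'].isPrefixOf (c :: r) := by
        rw [prefix3_iff]
        rintro ⟨rfl, r₂, rfl⟩
        exact h1 r₂ rfl rfl
      rw [show sO (c :: r) = c :: sO r from scan_cons_not _ _ _ _ hO1]
      -- sH steps over c
      have hH1 : ¬ ['H','v'].isPrefixOf (c :: sO r) := by
        rw [prefix2_iff]
        rintro ⟨rfl, t', ht⟩
        have hv : r.head? = some 'v' := by rw [← headO, ht]; rfl
        obtain ⟨r₂, rfl⟩ : ∃ r₂, r = 'v' :: r₂ := by
          cases r with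
          | nil => simp at hv
          | cons a r₂ => simp at hv; exact ⟨r₂, by rw [hv]⟩
        exact h2 r₂ rfl rfl
      rw [show sH (c :: sO r) = c :: sH (sO r) from scan_cons_not _ _ _ _ hH1]
      -- sS steps over c
      have hS1 : ¬ ['S','o','c'].isPrefixOf (c :: sH (sO r)) := by
        rw [prefix3_iff]
        rintro ⟨rfl, t', ht⟩
        have ho : r.head? = some 'o' := by rw [← headO, ← headH, ht]; rfl
        obtain ⟨r₂, rfl⟩ : ∃ r₂, r = 'o' :: r₂ := by
          cases r with
          | nil => simp at ho
          | cons a r₂ => simp at ho; exact ⟨r₂, by rw [ho]⟩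
        rw [stepO (by decide), stepH (by decide)] at ht
        have ht2 : sH (sO r₂) = 'c' :: t' := by injection ht
        have hc2 : r₂.head? = some 'c' := by rw [← headO, ← headH, ht2]; rfl
        obtain ⟨r₃, rfl⟩ : ∃ r₃, r₂ = 'c' :: r₃ := by
          cases r₂ with
          | nil => simp at hc2
          | cons a r₃ => simp at hc2; exact ⟨r₃, by rw [hc2]⟩
        exact h3 r₃ rfl rfl
      rw [show sS (c :: sH (sO r)) = c :: sS (sH (sO r)) from scan_cons_not _ _ _ _ hS1]
      -- sP steps over c
      have hP1 : ¬ ['P','v'].isPrefixOf (c :: sS (sH (sO r))) := by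
        rw [prefix2_iff]
        rintro ⟨rfl, t', ht⟩
        have hv : r.head? = some 'v' := by rw [← headO, ← headH, ← headS, ht]; rfl
        obtain ⟨r₂, rfl⟩ : ∃ r₂, r = 'v' :: r₂ := by
          cases r with
          | nil => simp at hv
          | cons a r₂ => simp at hv; exact ⟨r₂, by rw [hv]⟩
        exact h4 r₂ rfl rfl
      rw [show sP (c :: sS (sH (sO r))) = c :: sP (sS (sH (sO r))) from scan_cons_not _ _ _ _ hP1]
      -- sE steps over c
      have hE1 : ¬ ['E','u','m'].isPrefixOf (c :: sP (sS (sH (sO r)))) := by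
        rw [prefix3_iff]
        rintro ⟨rfl, t', ht⟩
        have hu : r.head? = some 'u' := by rw [← headO, ← headH, ← headS, ← headP, ht]; rfl
        obtain ⟨r₂, rfl⟩ : ∃ r₂, r = 'u' :: r₂ := by
          cases r with
          | nil => simp at hu
          | cons a r₂ => simp at hu; exact ⟨r₂, by rw [hu]⟩
        rw [stepO (by decide), stepH (by decide), stepS (by decide), stepP (by decide)] at ht
        have ht2 : sP (sS (sH (sO r₂))) = 'm' :: t' := by injection ht
        have hm : r₂.head? = some 'm' := by rw [← headO, ← headH, ← headS, ← headP, ht2]; rfl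
        obtain ⟨r₃, rfl⟩ : ∃ r₃, r₂ = 'm' :: r₃ := by
          cases r₂ with
          | nil => simp at hm
          | cons a r₃ => simp at hm; exact ⟨r₃, by rw [hm]⟩
        exact h5 r₃ rfl rfl
      rw [show sE (c :: sP (sS (sH (sO r)))) = c :: sE (sP (sS (sH (sO r)))) from scan_cons_not _ _ _ _ hE1]
      rw [ih, altReplace_default c r h1 h2 h3 h4 h5]

-- assembling: A's whole pipeline equals B's
theorem pipeline_eq (metric : String) : get_metric_name metric = get_metric_name_alt metric := by
  refine String.toList_inj.mp ?_
  show (get_metric_name metric).toList = (get_metric_name_alt metric).toList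
  unfold get_metric_name get_metric_name_alt
  have hitems : (PySem.Dict.ofList
      [(("Obj":String), ("Overall":String)), ("Hv","HV"), ("Soc","SoC"), ("Pv","PV"), ("Eum","EUM")]).items
      = [("Obj","Overall"), ("Hv","HV"), ("Soc","SoC"), ("Pv","PV"), ("Eum","EUM")] := rfl
  simp only [hitems, List.foldl, PySem.Str.toList_replace, String.toList_ofList]
  rw [show ("_" : String).toList = ['_'] from rfl, show (" " : String).toList = [' '] from rfl,
      show ("Obj" : String).toList = ['O','b','j'] from rfl,
      show ("Overall" : String).toList = ['O','v','e','r','a','l','l'] from rfl,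
      show ("Hv" : String).toList = ['H','v'] from rfl,
      show ("HV" : String).toList = ['H','V'] from rfl,
      show ("Soc" : String).toList = ['S','o','c'] from rfl,
      show ("SoC" : String).toList = ['S','o','C'] from rfl,
      show ("Pv" : String).toList = ['P','v'] from rfl,
      show ("PV" : String).toList = ['P','V'] from rfl,
      show ("Eum" : String).toList = ['E','u','m'] from rfl,
      show ("EUM" : String).toList = ['E','U','M'] from rfl]
  rw [replace_eq_scan _ ['_'] [' '] (by decide), scan_underscore, title_map]
  rw [replace_eq_scan _ ['O','b','j'] ['O','v','e','r','a','l','l'] (by decide),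
      replace_eq_scan _ ['H','v'] ['H','V'] (by decide),
      replace_eq_scan _ ['S','o','c'] ['S','o','C'] (by decide),
      replace_eq_scan _ ['P','v'] ['P','V'] (by decide),
      replace_eq_scan _ ['E','u','m'] ['E','U','M'] (by decide)]
  exact chain_eq_altReplace (altTitle metric.toList false)

-- ===== VERDICT (by name: the statement is the Claim_ definition above) =====
theorem get_metric_name_spec : Claim_equal_get_metric_name := by
  intro metric _
  unfold Spec_get_metric_name
  exact pipeline_eq metric
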